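-- pv_equiv track=rewrite | github.com/jagnyesh/researchflow | app/components/approval_tracker.py | _is_stage_complete
-- ===== SOURCE A (Python) =====
-- def _is_stage_complete(
--
--     current_state: str,
--     stage_key: str,
--     stages: list
-- ) -> bool:
--     """Check if a stage is complete based on current state"""
--     try:
--         current_idx = next(i for i, (key, _, _) in enumerate(stages) if key == current_state)
--         stage_idx = next(i for i, (key, _, _) in enumerate(stages) if key == stage_key)
--         return stage_idx < current_idx
--     except StopIteration:
--         return False
-- ===== SOURCE B (Python) =====
-- def _is_stage_complete(
--     current_state: str,
--     stage_key: str,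
--     stages: list
-- ) -> bool:
--     """Check if a stage is complete based on current state"""
--     seen_stage = False
--     for key, _, _ in stages:
--         if key == current_state:
--             return seen_stage
--         if key == stage_key:
--             seen_stage = True
--     return False
-- ===== Notes on version B (the rewrite author's own statement) =====
-- stated objective: simpler
-- what changed: Replaces A's two index-computing scans and index comparison with one early-exit pass carrying a boolean 'seen stage_key' flag: no indices are computed at all, the answer is the flag at the first occurrence of current_state.
import Mathlib
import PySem

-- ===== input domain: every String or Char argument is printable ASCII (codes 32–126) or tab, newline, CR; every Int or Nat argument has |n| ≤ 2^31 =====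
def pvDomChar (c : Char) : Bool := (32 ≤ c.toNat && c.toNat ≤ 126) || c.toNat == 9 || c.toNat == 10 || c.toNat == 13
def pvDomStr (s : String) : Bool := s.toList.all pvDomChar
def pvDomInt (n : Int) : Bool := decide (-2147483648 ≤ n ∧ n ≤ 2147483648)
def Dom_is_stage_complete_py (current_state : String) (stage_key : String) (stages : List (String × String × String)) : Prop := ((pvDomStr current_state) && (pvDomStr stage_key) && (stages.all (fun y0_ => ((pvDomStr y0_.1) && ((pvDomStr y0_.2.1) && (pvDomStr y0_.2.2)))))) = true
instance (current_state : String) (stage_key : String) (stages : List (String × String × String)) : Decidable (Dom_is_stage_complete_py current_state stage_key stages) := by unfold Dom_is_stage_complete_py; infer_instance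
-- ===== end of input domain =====

-- B replaces A's two index-computing scans with one early-exit pass over the stages carrying a 'seen stage_key' boolean flag (return value equivalence; no indices are computed in B).


-- ===== PORT A =====
-- next(i for i, (key, _, _) in enumerate(stages) if key == k): first matching index, none = StopIteration
def pvNextIdx? (k : String) : List (String × String × String) → Int → Option Int
  | [], _ => none
  | (key, _, _) :: rest, i => if key == k then some i else pvNextIdx? k rest (i + 1)

def is_stage_complete_py (current_state : String) (stage_key : String) (stages : List (String × String × String)) : Bool :=
  match pvNextIdx? current_state stages 0 with
  | none => false           -- except StopIteration: return False
  | some current_idx =>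
    match pvNextIdx? stage_key stages 0 with
    | none => false         -- except StopIteration: return False
    | some stage_idx => decide (stage_idx < current_idx)

-- ===== PORT B =====
-- the loop: for key, _, _ in stages: if key == current_state: return seen_stage; if key == stage_key: seen_stage = True
def pvScan (cs sk : String) : List (String × String × String) → Bool → Bool
  | [], _ => false
  | (key, _, _) :: rest, seen =>
    if key == cs then seen
    else if key == sk then pvScan cs sk rest true
    else pvScan cs sk rest seen

def is_stage_complete_py_alt (current_state : String) (stage_key : String) (stages : List (String × String × String)) : Bool :=
  pvScan current_state stage_key stages false

-- ===== PRECONDITION & SPEC =====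
def Spec_is_stage_complete_py (current_state : String) (stage_key : String) (stages : List (String × String × String)) (out : Bool) : Prop := out = is_stage_complete_py_alt current_state stage_key stages
instance (current_state : String) (stage_key : String) (stages : List (String × String × String)) (out : Bool) : Decidable (Spec_is_stage_complete_py current_state stage_key stages out) := by unfold Spec_is_stage_complete_py; infer_instance

-- ===== CLAIM (what is proved, stated in full; the proofs are below) =====
def Claim_equal_is_stage_complete_py : Prop := ∀ (current_state : String) (stage_key : String) (stages : List (String × String × String)), Dom_is_stage_complete_py current_state stage_key stages → Spec_is_stage_complete_py current_state stage_key stages (is_stage_complete_py current_state stage_key stages)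

-- ===== LEMMAS AND PROOFS =====
-- first matching index from start n is ≥ n
theorem pvNextIdx?_ge (k : String) (l : List (String × String × String)) (n m : Int)
    (h : pvNextIdx? k l n = some m) : n ≤ m := by
  induction l generalizing n with
  | nil => simp [pvNextIdx?] at h
  | cons hd tl ih =>
    obtain ⟨key, a, b⟩ := hd
    simp only [pvNextIdx?] at h
    split at h
    · cases h; omega
    · have := ih (n + 1) h; omega

-- Loop invariant: the scan with flag 'seen' on the tail starting at index n computes exactly
-- A's comparison of the first-occurrence indices from n, with 'seen' standing for 'sk already seen'.
theorem pvScan_eq (cs sk : String) (l : List (String × String × String)) (n : Int) (seen : Bool) :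
    pvScan cs sk l seen =
      match pvNextIdx? cs l n with
      | none => false
      | some ci => seen || (match pvNextIdx? sk l n with
                            | none => false
                            | some si => decide (si < ci)) := by
  induction l generalizing n seen with
  | nil => simp [pvScan, pvNextIdx?]
  | cons hd tl ih =>
    obtain ⟨key, a, b⟩ := hd
    simp only [pvScan, pvNextIdx?]
    by_cases hcs : key == cs
    · simp only [hcs, if_true]
      by_cases hsk : key == sk
      · simp only [hsk, if_true]
        simp
      · simp only [hsk]
        cases hsi : pvNextIdx? sk tl (n + 1) with
        | none => simp
        | some si =>
          have := pvNextIdx?_ge sk tl (n + 1) si hsi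
          have hlt : decide (si < n) = false := by simp; omega
          simp [hlt]
    · simp only [hcs]
      by_cases hsk : key == sk
      · simp only [hsk, if_true]
        rw [ih (n + 1) true]
        cases hci : pvNextIdx? cs tl (n + 1) with
        | none => rfl
        | some ci =>
          have := pvNextIdx?_ge cs tl (n + 1) ci hci
          simp
          omega
      · simp only [hsk]
        exact ih (n + 1) seen

-- ===== VERDICT (by name: the statement is the Claim_ definition above) =====
theorem is_stage_complete_py_spec : Claim_equal_is_stage_complete_py := by
  intro current_state stage_key stages _
  unfold Spec_is_stage_complete_py is_stage_complete_py is_stage_complete_py_alt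
  rw [pvScan_eq current_state stage_key stages 0 false]
  cases pvNextIdx? current_state stages 0 <;> cases pvNextIdx? stage_key stages 0 <;> simp
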